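-- pv_equiv track=rewrite | github.com/BlastWind/leetcode | weekly-contest-328/count-the-number-of-good-subarrays.py | countGood
-- ===== SOURCE A (Python) =====
-- from collections import defaultdict
-- from typing import List
--
-- def countGood(nums: List[int], k: int) -> int:
--     # sliding window
--     # increase window until window is "good", add len(nums) - window_end to total
--     # once "good", shrink window_start, for each shrink
--         # if still "good", add len(nums) - window_end
--         # if no longer "good", we can start expanding right border again
--
--     # the window itself maintains a freq table of numbers and the number of good indices
--     total = 0
--
--     left, right = 0, 0
--     # freq = [0] * 11
--     freq = defaultdict(int)
--     good_indices = 0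
--
--     freq[nums[0]] = 1
--     while right >= left and right < len(nums) - 1:
--         right += 1
--         new_num = nums[right]
--         good_indices += freq[new_num] # adds the count of equal nums that have smaller indices!
--         freq[nums[right]] += 1
--
--         if good_indices >= k:
--             total += len(nums) - (right)
--
--             while good_indices >= k and right > left:
--                 freq[nums[left]] -= 1
--                 good_indices -= freq[nums[left]] # double check later
--
--                 if good_indices >= k:
--                     total += len(nums) - (right)
--                 left += 1
--
--     return total
-- ===== SOURCE B (Python) =====
-- def countGood(nums, k):
--     # For each start index, extend right until the window has k equal pairs;
--     # then every longer subarray with this start is good too.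
--     n = len(nums)
--     total = 0
--     for left in range(n):
--         freq = {}
--         pairs = 0
--         for right in range(left, n):
--             v = nums[right]
--             c = freq.get(v, 0)
--             pairs += c
--             freq[v] = c + 1
--             if pairs >= k:
--                 total += n - right
--                 break
--     return total
-- ===== Notes on version B (the rewrite author's own statement) =====
-- stated objective: alternative
-- what changed: Replaced A's single-pass two-pointer sliding window (shared frequency table, interleaved shrinking) by a restarted per-start scan: for each left a fresh frequency dict is grown rightward until k equal pairs are reached, then n-right is added and the scan breaks.
-- intended difference: For k <= 0 every subarray (including empty-extension singletons) already has at least k equal pairs, so the intended count is n(n+1)/2, which B returns; A returns n(n-1) there because its window never counts single-element subarrays and it double-adds while shrinking. — e.g. on countGood([1], 0): A returns 0, B returns 1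
import Mathlib
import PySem

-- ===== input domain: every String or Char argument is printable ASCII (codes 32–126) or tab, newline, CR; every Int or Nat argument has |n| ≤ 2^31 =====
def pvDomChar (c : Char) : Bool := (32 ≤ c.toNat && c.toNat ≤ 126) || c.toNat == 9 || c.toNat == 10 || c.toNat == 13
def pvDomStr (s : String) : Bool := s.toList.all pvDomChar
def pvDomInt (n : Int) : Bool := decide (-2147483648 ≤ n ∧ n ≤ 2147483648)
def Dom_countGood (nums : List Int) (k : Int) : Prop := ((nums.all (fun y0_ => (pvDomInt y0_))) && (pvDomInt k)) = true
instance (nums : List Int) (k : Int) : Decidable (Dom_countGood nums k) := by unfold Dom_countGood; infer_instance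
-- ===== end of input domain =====

-- B replaces A's single-pass two-pointer sliding window by a restarted per-start scan
-- (fresh frequency dict per left, extend right until k pairs, add n-right, break);
-- equal for k ≥ 1 on nonempty input, B fixes A's accidental n(n-1) answer for k ≤ 0
-- and returns 0 where A raises IndexError on empty input.

-- ===== PORT A =====
-- inner `while good_indices >= k and right > left` loop of A; state (left, freq, good, total)
def cgShrink (nums : List Int) (k : Int) (right : Nat) :
    Nat → Nat → PySem.Dict Int Int → Int → Int → (Nat × PySem.Dict Int Int × Int × Int)
  | 0, left, freq, good, total => (left, freq, good, total)
  | fuel+1, left, freq, good, total =>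
    if k ≤ good ∧ left < right then
      let v := nums.getD left 0
      let freq' := freq.insert v (freq.getD v 0 - 1)
      let good' := good - freq'.getD v 0
      let total' := if k ≤ good' then total + ((nums.length : Int) - right) else total
      cgShrink nums k right fuel (left+1) freq' good' total'
    else (left, freq, good, total)

-- outer `while right >= left and right < len(nums) - 1` loop of A
def cgOuter (nums : List Int) (k : Int) :
    Nat → Nat → Nat → PySem.Dict Int Int → Int → Int → Int
  | 0, _, _, _, _, total => total
  | fuel+1, left, right, freq, good, total =>
    if left ≤ right ∧ right + 1 < nums.length then
      let right' := right + 1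
      let v := nums.getD right' 0
      let good' := good + freq.getD v 0
      let freq' := freq.insert v (freq.getD v 0 + 1)
      if k ≤ good' then
        let total' := total + ((nums.length : Int) - right')
        let st := cgShrink nums k right' (right' - left) left freq' good' total'
        cgOuter nums k fuel st.1 right' st.2.1 st.2.2.1 st.2.2.2
      else cgOuter nums k fuel left right' freq' good' total
    else total

def countGood (nums : List Int) (k : Int) : Int :=
  cgOuter nums k nums.length 0 0 ((PySem.Dict.empty).insert (nums.getD 0 0) 1) 0 0

-- ===== PORT B =====
-- inner `for right in range(left, n)` loop of B with its break; fuel = n - r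
def cgScan (nums : List Int) (k : Int) : Nat → Nat → PySem.Dict Int Int → Int → Int
  | 0, _, _, _ => 0
  | fuel+1, r, freq, pairs =>
    let v := nums.getD r 0
    let c := freq.getD v 0
    let pairs' := pairs + c
    if k ≤ pairs' then (nums.length : Int) - r
    else cgScan nums k fuel (r+1) (freq.insert v (c + 1)) pairs'

def countGood_alt (nums : List Int) (k : Int) : Int :=
  (List.range nums.length).foldl
    (fun total l => total + cgScan nums k (nums.length - l) l PySem.Dict.empty 0) 0

-- ===== PRECONDITION & SPEC =====
-- Pre_ excludes only the empty list, on which A raises IndexError at freq[nums[0]].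
def Pre_countGood (nums : List Int) (k : Int) : Prop := nums ≠ []
instance (nums : List Int) (k : Int) : Decidable (Pre_countGood nums k) := by
  unfold Pre_countGood; infer_instance
def pvWitness_countGood : List Int × Int := ([1, 2, 1, 1], 2)

-- For k ≤ 0 every subarray already has at least k equal pairs, so the intended count is
-- n(n+1)/2, which B returns; A returns n(n-1) there, an accident of its window never
-- counting single-element subarrays and double-adding while shrinking.
def D_countGood (nums : List Int) (k : Int) : Prop := k ≤ 0
instance (nums : List Int) (k : Int) : Decidable (D_countGood nums k) := by
  unfold D_countGood; infer_instance

def Spec_countGood (nums : List Int) (k : Int) (out : Int) : Prop :=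
  ¬ D_countGood nums k → out = countGood_alt nums k
instance (nums : List Int) (k : Int) (out : Int) : Decidable (Spec_countGood nums k out) := by
  unfold Spec_countGood; infer_instance

def pvDiffWitness_countGood : List Int × Int := ([1], 0)
def pvDiffWitnessOut_countGood : Int × Int := (0, 1)

-- ===== CLAIM (what is proved, stated in full; the proofs are below) =====
def Claim_unchanged_countGood : Prop := ∀ (nums : List Int) (k : Int),
  Dom_countGood nums k → Pre_countGood nums k → Spec_countGood nums k (countGood nums k)
def Claim_changed_countGood : Prop :=
  Dom_countGood (pvDiffWitness_countGood.1) (pvDiffWitness_countGood.2) ∧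
  Pre_countGood (pvDiffWitness_countGood.1) (pvDiffWitness_countGood.2) ∧
  D_countGood (pvDiffWitness_countGood.1) (pvDiffWitness_countGood.2) ∧
  countGood (pvDiffWitness_countGood.1) (pvDiffWitness_countGood.2) = pvDiffWitnessOut_countGood.1 ∧
  countGood_alt (pvDiffWitness_countGood.1) (pvDiffWitness_countGood.2) = pvDiffWitnessOut_countGood.2 ∧
  pvDiffWitnessOut_countGood.1 ≠ pvDiffWitnessOut_countGood.2
-- ===== LEMMAS AND PROOFS =====

-- count (as an Int) of value v among indices [a, b) of nums
def cgW (nums : List Int) (a b : Nat) (v : Int) : Int :=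
  ∑ i ∈ Finset.Ico a b, (if nums.getD i 0 = v then 1 else 0)

-- number of equal pairs (i, j), a ≤ i < j < b
def cgPC (nums : List Int) (a b : Nat) : Int :=
  ∑ j ∈ Finset.Ico a b, cgW nums a j (nums.getD j 0)

-- first good end index for start l, and the contribution of start l
def cgFind (nums : List Int) (k : Int) (l : Nat) : Option Nat :=
  (List.range' l (nums.length - l)).find? (fun j => decide (k ≤ cgPC nums l (j+1)))
def cgContrib (nums : List Int) (k : Int) (l : Nat) : Int :=
  match cgFind nums k l with
  | some j => (nums.length : Int) - j
  | none => 0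

lemma cgW_nonneg (nums : List Int) (a b : Nat) (v : Int) : 0 ≤ cgW nums a b v := by
  unfold cgW; exact Finset.sum_nonneg (fun i _ => by positivity)

lemma cgW_zero (nums : List Int) (a b : Nat) (v : Int) (h : b ≤ a) : cgW nums a b v = 0 := by
  unfold cgW; rw [Finset.Ico_eq_empty (by omega)]; simp

lemma cgW_succ_top (nums : List Int) (a b : Nat) (v : Int) (h : a ≤ b) :
    cgW nums a (b+1) v = cgW nums a b v + (if nums.getD b 0 = v then 1 else 0) := by
  unfold cgW; rw [Finset.sum_Ico_succ_top h]

lemma cgW_cons_bot (nums : List Int) (a b : Nat) (v : Int) (h : a < b) :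
    cgW nums a b v = (if nums.getD a 0 = v then 1 else 0) + cgW nums (a+1) b v := by
  unfold cgW; rw [Finset.sum_eq_sum_Ico_succ_bot h]

lemma cgPC_nonneg (nums : List Int) (a b : Nat) : 0 ≤ cgPC nums a b := by
  unfold cgPC; exact Finset.sum_nonneg (fun j _ => cgW_nonneg _ _ _ _)

lemma cgPC_zero (nums : List Int) (a b : Nat) (h : b ≤ a) : cgPC nums a b = 0 := by
  unfold cgPC; rw [Finset.Ico_eq_empty (by omega)]; simp

lemma cgPC_succ_top (nums : List Int) (a b : Nat) (h : a ≤ b) :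
    cgPC nums a (b+1) = cgPC nums a b + cgW nums a b (nums.getD b 0) := by
  unfold cgPC; rw [Finset.sum_Ico_succ_top h]

lemma cgPC_cons_bot (nums : List Int) (a b : Nat) (h : a < b) :
    cgPC nums a b = cgPC nums (a+1) b + cgW nums (a+1) b (nums.getD a 0) := by
  unfold cgPC
  rw [Finset.sum_eq_sum_Ico_succ_bot h, cgW_zero nums a a _ le_rfl, zero_add]
  rw [Finset.sum_congr rfl (fun j hj => cgW_cons_bot nums a j (nums.getD j 0)
        (by simp only [Finset.mem_Ico] at hj; omega)),
      Finset.sum_add_distrib]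
  have h2 : ∑ j ∈ Finset.Ico (a+1) b, (if nums.getD a 0 = nums.getD j 0 then (1:Int) else 0)
      = cgW nums (a+1) b (nums.getD a 0) := by
    unfold cgW
    refine Finset.sum_congr rfl (fun j _ => ?_)
    rcases eq_or_ne (nums.getD a 0) (nums.getD j 0) with hh | hh
    · rw [if_pos hh, if_pos hh.symm]
    · rw [if_neg hh, if_neg (Ne.symm hh)]
  rw [h2]; ring

lemma cgPC_succ_le (nums : List Int) (a b : Nat) : cgPC nums (a+1) b ≤ cgPC nums a b := by
  rcases lt_or_ge a b with h | h
  · rw [cgPC_cons_bot nums a b h]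
    have := cgW_nonneg nums (a+1) b (nums.getD a 0); omega
  · rw [cgPC_zero nums (a+1) b (by omega)]
    exact cgPC_nonneg nums a b

lemma cgPC_anti_l (nums : List Int) (b : Nat) : ∀ {a a' : Nat}, a ≤ a' →
    cgPC nums a' b ≤ cgPC nums a b := by
  intro a a' h
  induction a', h using Nat.le_induction with
  | base => exact le_rfl
  | succ m hm ih => exact le_trans (cgPC_succ_le nums m b) ih

lemma find?_range'_eq_some (p : Nat → Bool) :
    ∀ (len a j : Nat), a ≤ j → j < a + len → p j = true →
    (∀ i, a ≤ i → i < j → p i = false) →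
    (List.range' a len).find? p = some j := by
  intro len
  induction len with
  | zero => intro a j h1 h2; omega
  | succ m ih =>
    intro a j h1 h2 hp hprev
    rw [List.range'_succ, List.find?_cons]
    rcases eq_or_ne j a with rfl | hne
    · simp [hp]
    · have ha : p a = false := hprev a le_rfl (by omega)
      simp only [ha]
      exact ih (a+1) j (by omega) (by omega) hp (fun i hi1 hi2 => hprev i (by omega) hi2)

lemma cgFind_eq_some (nums : List Int) (k : Int) (l j : Nat)
    (h1 : l ≤ j) (h2 : j < nums.length) (hg : k ≤ cgPC nums l (j+1))
    (hprev : ∀ i, l ≤ i → i < j → ¬ k ≤ cgPC nums l (i+1)) :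
    cgFind nums k l = some j := by
  unfold cgFind
  exact find?_range'_eq_some _ (nums.length - l) l j h1 (by omega) (by simpa using hg)
    (fun i hi1 hi2 => by simpa using hprev i hi1 hi2)

lemma cgFind_eq_none (nums : List Int) (k : Int) (l : Nat)
    (h : ∀ j, l ≤ j → j < nums.length → ¬ k ≤ cgPC nums l (j+1)) :
    cgFind nums k l = none := by
  unfold cgFind
  rw [List.find?_eq_none]
  intro j hj
  rw [List.mem_range'_1] at hj
  simpa using h j hj.1 (by omega)

lemma cgContrib_pos (nums : List Int) (k : Int) (l j : Nat)
    (h1 : l ≤ j) (h2 : j < nums.length) (hg : k ≤ cgPC nums l (j+1))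
    (hprev : ∀ i, l ≤ i → i < j → ¬ k ≤ cgPC nums l (i+1)) :
    cgContrib nums k l = (nums.length : Int) - j := by
  unfold cgContrib; rw [cgFind_eq_some nums k l j h1 h2 hg hprev]

lemma cgContrib_zero (nums : List Int) (k : Int) (l : Nat)
    (h : ∀ j, l ≤ j → j < nums.length → ¬ k ≤ cgPC nums l (j+1)) :
    cgContrib nums k l = 0 := by
  unfold cgContrib; rw [cgFind_eq_none nums k l h]

-- B side: the scan starting at r computes the contribution tail
lemma cgScan_spec (nums : List Int) (k : Int) (l : Nat) :
    ∀ (fuel r : Nat) (freq : PySem.Dict Int Int) (pairs : Int),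
    l ≤ r → fuel = nums.length - r →
    (∀ v, freq.getD v 0 = cgW nums l r v) →
    pairs = cgPC nums l r →
    cgScan nums k fuel r freq pairs =
      (match (List.range' r (nums.length - r)).find?
          (fun j => decide (k ≤ cgPC nums l (j+1))) with
        | some j => (nums.length : Int) - j
        | none => 0) := by
  intro fuel
  induction fuel with
  | zero =>
    intro r freq pairs hlr hfuel hfreq hpairs
    rw [show nums.length - r = 0 by omega]
    simp [cgScan]
  | succ m ih =>
    intro r freq pairs hlr hfuel hfreq hpairs
    rw [show nums.length - r = m + 1 by omega, List.range'_succ]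
    have hp' : pairs + freq.getD (nums.getD r 0) 0 = cgPC nums l (r+1) := by
      rw [hfreq, hpairs, cgPC_succ_top nums l r hlr]
    by_cases hgood : k ≤ cgPC nums l (r+1)
    · simp only [cgScan]
      rw [if_pos (show k ≤ pairs + freq.getD (nums.getD r 0) 0 by rw [hp']; exact hgood)]
      simp [hgood]
    · have hrec := ih (r+1) (freq.insert (nums.getD r 0) (freq.getD (nums.getD r 0) 0 + 1))
        (pairs + freq.getD (nums.getD r 0) 0) (by omega) (by omega)
        (by
          intro v
          rw [PySem.Dict.getD_insert, cgW_succ_top nums l r v hlr]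
          rcases eq_or_ne v (nums.getD r 0) with hv | hv
          · rw [if_pos hv, hfreq, hv, if_pos rfl]
          · rw [if_neg hv, hfreq, if_neg (Ne.symm hv), add_zero])
        hp'
      simp only [cgScan]
      rw [if_neg (show ¬ k ≤ pairs + freq.getD (nums.getD r 0) 0 by rw [hp']; exact hgood)]
      rw [hrec, show nums.length - (r+1) = m by omega]
      simp [hgood]

lemma foldl_range_sum (f : Nat → Int) : ∀ n : Nat,
    (List.range n).foldl (fun t l => t + f l) 0 = ∑ l ∈ Finset.range n, f l := by
  intro n
  induction n with
  | zero => simp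
  | succ m ih => rw [List.range_succ, List.foldl_append, Finset.sum_range_succ, ih]; simp

lemma countGood_alt_eq_sum (nums : List Int) (k : Int) :
    countGood_alt nums k = ∑ l ∈ Finset.range nums.length, cgContrib nums k l := by
  unfold countGood_alt
  rw [foldl_range_sum (fun l => cgScan nums k (nums.length - l) l PySem.Dict.empty 0)]
  refine Finset.sum_congr rfl (fun l _ => ?_)
  rw [cgScan_spec nums k l (nums.length - l) l PySem.Dict.empty 0 le_rfl rfl
    (fun v => by rw [PySem.Dict.getD_empty, cgW_zero nums l l v le_rfl])
    (by rw [cgPC_zero nums l l le_rfl])]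
  rfl

-- A side: the shrink loop
lemma cgPC_self (nums : List Int) (a : Nat) : cgPC nums a (a+1) = 0 := by
  rw [cgPC_succ_top nums a a le_rfl, cgPC_zero nums a a le_rfl, cgW_zero nums a a _ le_rfl]; omega

lemma cgShrink_spec (nums : List Int) (k : Int) (hk : 1 ≤ k) (r : Nat) (hr : r < nums.length) :
    ∀ (fuel left : Nat) (freq : PySem.Dict Int Int) (good total : Int),
    fuel = r - left → left ≤ r →
    (∀ v, freq.getD v 0 = cgW nums left (r+1) v) →
    good = cgPC nums left (r+1) →
    (∀ j, left ≤ j → j < r → ¬ k ≤ cgPC nums left (j+1)) →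
    total = (∑ l' ∈ Finset.range left, cgContrib nums k l')
            + (if k ≤ cgPC nums left (r+1) then (nums.length : Int) - r else 0) →
    ∃ L F, cgShrink nums k r fuel left freq good total
        = (L, F, cgPC nums L (r+1), ∑ l' ∈ Finset.range L, cgContrib nums k l')
      ∧ L ≤ r
      ∧ (∀ v, F.getD v 0 = cgW nums L (r+1) v)
      ∧ (∀ j, L ≤ j → j ≤ r → ¬ k ≤ cgPC nums L (j+1)) := by
  intro fuel
  induction fuel with
  | zero =>
    intro left freq good total hfuel hle hfreq hgood hprev htotal
    have hlr : left = r := by omega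
    subst hlr
    have hnotgood : ¬ k ≤ cgPC nums left (left+1) := by rw [cgPC_self]; omega
    have ht : total = ∑ l' ∈ Finset.range left, cgContrib nums k l' := by
      rw [htotal, if_neg hnotgood, add_zero]
    refine ⟨left, freq, ?_, le_rfl, hfreq, ?_⟩
    · simp only [cgShrink]; rw [hgood, ht]
    · intro j hj1 hj2
      have : j = left := by omega
      subst this; exact hnotgood
  | succ m ih =>
    intro left freq good total hfuel hle hfreq hgood hprev htotal
    by_cases hc : k ≤ good ∧ left < r
    · obtain ⟨hkg, hlr⟩ := hc
      have hgEq : k ≤ cgPC nums left (r+1) := hgood ▸ hkg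
      have hgd : (freq.insert (nums.getD left 0) (freq.getD (nums.getD left 0) 0 - 1)).getD
          (nums.getD left 0) 0 = freq.getD (nums.getD left 0) 0 - 1 :=
        PySem.Dict.getD_insert_self _ _ _ _
      have hfreq' : ∀ v', (freq.insert (nums.getD left 0) (freq.getD (nums.getD left 0) 0 - 1)).getD v' 0
          = cgW nums (left+1) (r+1) v' := by
        intro v'
        rw [PySem.Dict.getD_insert]
        have hW := cgW_cons_bot nums left (r+1) v' (by omega)
        rcases eq_or_ne v' (nums.getD left 0) with hv | hv
        · subst hv
          rw [if_pos rfl, hfreq]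
          rw [if_pos rfl] at hW
          omega
        · rw [if_neg hv, hfreq]
          rw [if_neg (fun hh => hv (hh.symm)), zero_add] at hW
          omega
      have hgood' : good - (freq.insert (nums.getD left 0) (freq.getD (nums.getD left 0) 0 - 1)).getD
          (nums.getD left 0) 0 = cgPC nums (left+1) (r+1) := by
        rw [hfreq' (nums.getD left 0), hgood, cgPC_cons_bot nums left (r+1) (by omega)]
        ring
      have hcontrib : cgContrib nums k left = (nums.length : Int) - r :=
        cgContrib_pos nums k left r hle hr hgEq hprev
      have htot1 : total = ∑ l' ∈ Finset.range (left+1), cgContrib nums k l' := by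
        rw [Finset.sum_range_succ, hcontrib, htotal, if_pos hgEq]
      have hprev' : ∀ j, left+1 ≤ j → j < r → ¬ k ≤ cgPC nums (left+1) (j+1) := by
        intro j h1 h2 hcontra
        exact hprev j (by omega) h2 (le_trans hcontra (cgPC_anti_l nums (j+1) (Nat.le_succ left)))
      have htotal' :
          (if k ≤ good - (freq.insert (nums.getD left 0) (freq.getD (nums.getD left 0) 0 - 1)).getD
              (nums.getD left 0) 0 then total + ((nums.length : Int) - r) else total)
          = (∑ l' ∈ Finset.range (left+1), cgContrib nums k l')
            + (if k ≤ cgPC nums (left+1) (r+1) then (nums.length : Int) - r else 0) := by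
        rw [hgood']
        by_cases hg2 : k ≤ cgPC nums (left+1) (r+1)
        · rw [if_pos hg2, if_pos hg2, htot1]
        · rw [if_neg hg2, if_neg hg2, htot1, add_zero]
      obtain ⟨L, F, h1, h2, h3, h4⟩ := ih (left+1)
        (freq.insert (nums.getD left 0) (freq.getD (nums.getD left 0) 0 - 1))
        (good - (freq.insert (nums.getD left 0) (freq.getD (nums.getD left 0) 0 - 1)).getD
          (nums.getD left 0) 0)
        (if k ≤ good - (freq.insert (nums.getD left 0) (freq.getD (nums.getD left 0) 0 - 1)).getD
            (nums.getD left 0) 0 then total + ((nums.length : Int) - r) else total)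
        (by omega) (by omega) hfreq' hgood' hprev' htotal'
      refine ⟨L, F, ?_, h2, h3, h4⟩
      simp only [cgShrink]
      rw [if_pos ⟨hkg, hlr⟩]
      exact h1
    · have hnotgood : ¬ k ≤ cgPC nums left (r+1) := by
        rcases not_and_or.mp hc with h | h
        · rw [hgood] at h; exact h
        · have : left = r := by omega
          subst this; rw [cgPC_self]; omega
      have ht : total = ∑ l' ∈ Finset.range left, cgContrib nums k l' := by
        rw [htotal, if_neg hnotgood, add_zero]
      refine ⟨left, freq, ?_, hle, hfreq, ?_⟩
      · simp only [cgShrink]; rw [if_neg hc, hgood, ht]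
      · intro j hj1 hj2
        rcases Nat.lt_or_ge j r with h | h
        · exact hprev j hj1 h
        · have : j = r := by omega
          subst this; exact hnotgood

lemma cgSum_tail (nums : List Int) (k : Int) (left right : Nat)
    (hle : left ≤ right) (hr : right + 1 = nums.length)
    (H : ∀ j, left ≤ j → j ≤ right → ¬ k ≤ cgPC nums left (j+1)) :
    ∑ l' ∈ Finset.range left, cgContrib nums k l'
      = ∑ l' ∈ Finset.range nums.length, cgContrib nums k l' := by
  have hln : left ≤ nums.length := by omega
  rw [Finset.range_eq_Ico, ← Finset.sum_Ico_consecutive _ (Nat.zero_le left) hln]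
  have hz : ∑ l' ∈ Finset.Ico left nums.length, cgContrib nums k l' = 0 := by
    refine Finset.sum_eq_zero (fun l' hl' => ?_)
    simp only [Finset.mem_Ico] at hl'
    refine cgContrib_zero nums k l' (fun j hj1 hj2 hcon => ?_)
    have h1 : cgPC nums l' (j+1) ≤ cgPC nums left (j+1) := cgPC_anti_l nums (j+1) hl'.1
    exact H j (by omega) (by omega) (le_trans hcon h1)
  rw [hz, add_zero]

lemma cgOuter_spec (nums : List Int) (k : Int) (hk : 1 ≤ k) :
    ∀ (fuel left right : Nat) (freq : PySem.Dict Int Int) (good total : Int),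
    nums.length ≤ right + 1 + fuel → left ≤ right → right < nums.length →
    (∀ v, freq.getD v 0 = cgW nums left (right+1) v) →
    good = cgPC nums left (right+1) →
    (∀ j, left ≤ j → j ≤ right → ¬ k ≤ cgPC nums left (j+1)) →
    total = ∑ l' ∈ Finset.range left, cgContrib nums k l' →
    cgOuter nums k fuel left right freq good total
      = ∑ l' ∈ Finset.range nums.length, cgContrib nums k l' := by
  intro fuel
  induction fuel with
  | zero =>
    intro left right freq good total hfuel hle hr hfreq hgood H htotal
    simp only [cgOuter]
    rw [htotal]
    exact cgSum_tail nums k left right hle (by omega) H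
  | succ m ih =>
    intro left right freq good total hfuel hle hr hfreq hgood H htotal
    simp only [cgOuter]
    by_cases hcond : right + 1 < nums.length
    · rw [if_pos ⟨hle, hcond⟩]
      have hg' : good + freq.getD (nums.getD (right+1) 0) 0 = cgPC nums left (right+1+1) := by
        rw [hgood, hfreq, cgPC_succ_top nums left (right+1) (by omega)]
      have hfreq2 : ∀ v', (freq.insert (nums.getD (right+1) 0)
            (freq.getD (nums.getD (right+1) 0) 0 + 1)).getD v' 0
          = cgW nums left (right+1+1) v' := by
        intro v'
        rw [PySem.Dict.getD_insert, cgW_succ_top nums left (right+1) v' (by omega)]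
        rcases eq_or_ne v' (nums.getD (right+1) 0) with hv | hv
        · subst hv; rw [if_pos rfl, if_pos rfl, hfreq]
        · rw [if_neg hv, if_neg (fun hh => hv hh.symm), hfreq, add_zero]
      by_cases hgood2 : k ≤ good + freq.getD (nums.getD (right+1) 0) 0
      · rw [if_pos hgood2]
        have hgE : k ≤ cgPC nums left (right+1+1) := hg' ▸ hgood2
        have hprev : ∀ j, left ≤ j → j < right+1 → ¬ k ≤ cgPC nums left (j+1) :=
          fun j h1 h2 => H j h1 (by omega)
        have htot' : total + ((nums.length : Int) - (right+1))
            = (∑ l' ∈ Finset.range left, cgContrib nums k l')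
              + (if k ≤ cgPC nums left (right+1+1) then (nums.length : Int) - (right+1) else 0) := by
          rw [if_pos hgE, htotal]
        obtain ⟨L, F, h1, h2, h3, h4⟩ := cgShrink_spec nums k hk (right+1) (by omega)
          (right+1-left) left
          (freq.insert (nums.getD (right+1) 0) (freq.getD (nums.getD (right+1) 0) 0 + 1))
          (good + freq.getD (nums.getD (right+1) 0) 0)
          (total + ((nums.length : Int) - (right+1)))
          rfl (by omega) hfreq2 hg' hprev htot'
        push_cast at h1 ⊢
        rw [h1]
        exact ih L (right+1) F (cgPC nums L (right+1+1))
          (∑ l' ∈ Finset.range L, cgContrib nums k l')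
          (by omega) h2 (by omega) h3 rfl h4 rfl
      · rw [if_neg hgood2]
        have hnot : ¬ k ≤ cgPC nums left (right+1+1) := by rw [← hg']; exact hgood2
        refine ih left (right+1)
          (freq.insert (nums.getD (right+1) 0) (freq.getD (nums.getD (right+1) 0) 0 + 1))
          (good + freq.getD (nums.getD (right+1) 0) 0) total
          (by omega) (by omega) (by omega) hfreq2 hg' ?_ htotal
        intro j hj1 hj2
        rcases Nat.lt_or_ge j (right+1) with h | h
        · exact H j hj1 (by omega)
        · have : j = right + 1 := by omega
          subst this; exact hnot
    · rw [if_neg (fun hh => hcond hh.2)]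
      rw [htotal]
      exact cgSum_tail nums k left right hle (by omega) H

-- ===== VERDICT (by name: the statement is the Claim_ definition above) =====
theorem countGood_spec : Claim_unchanged_countGood := by
  intro nums k _ hpre
  unfold Spec_countGood
  intro hD
  have hk : 1 ≤ k := by unfold D_countGood at hD; omega
  have hn : 0 < nums.length := List.length_pos_of_ne_nil hpre
  rw [countGood_alt_eq_sum]
  unfold countGood
  refine cgOuter_spec nums k hk nums.length 0 0 _ 0 0 (by omega) le_rfl hn ?_
    (cgPC_self nums 0).symm ?_ (by simp)
  · intro v
    rw [PySem.Dict.getD_insert]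
    have hw : cgW nums 0 1 v = if nums.getD 0 0 = v then 1 else 0 := by
      unfold cgW
      rw [show Finset.Ico 0 1 = {0} from rfl, Finset.sum_singleton]
    rw [hw]
    rcases eq_or_ne v (nums.getD 0 0) with hv | hv
    · subst hv; rw [if_pos rfl, if_pos rfl]
    · rw [if_neg hv, if_neg (fun hh => hv hh.symm), PySem.Dict.getD_empty]
  · intro j h1 h2
    have hj : j = 0 := by omega
    subst hj
    rw [cgPC_self]
    omega

theorem countGood_changed : Claim_changed_countGood := by
  unfold Claim_changed_countGood; decide
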